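-- pv_equiv track=rewrite | github.com/aditya1513/casting-ai | python-ai-service/app/algorithms/pattern_mining.py | _find_suffix
-- ===== SOURCE A (Python) =====
-- from typing import List, Dict, Any, Tuple, Set, Optional
--
-- def _find_suffix(
--
--     sequence: List[str],
--     prefix: List[str]
-- ) -> Optional[List[str]]:
--     """Find suffix after prefix in sequence."""
--     for i in range(len(sequence) - len(prefix) + 1):
--         if sequence[i:i+len(prefix)] == prefix:
--             return sequence[i+len(prefix):]
--     return None
-- ===== SOURCE B (Python) =====
-- def _find_suffix(sequence, prefix):
--     """Find suffix after prefix in sequence (Knuth-Morris-Pratt over the token list)."""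
--     m = len(prefix)
--     if m == 0:
--         return sequence[0:]
--     # failure table: fail[q] = length of longest proper border of prefix[:q+1]
--     fail = [0] * m
--     k = 0
--     for q in range(1, m):
--         while k > 0 and prefix[q] != prefix[k]:
--             k = fail[k - 1]
--         if prefix[q] == prefix[k]:
--             k += 1
--         fail[q] = k
--     # scan
--     q = 0
--     for i, tok in enumerate(sequence):
--         while q > 0 and tok != prefix[q]:
--             q = fail[q - 1]
--         if tok == prefix[q]:
--             q += 1
--         if q == m:
--             return sequence[i + 1:]
--     return None
-- ===== Notes on version B (the rewrite author's own statement) =====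
-- stated objective: alternative
-- what changed: Replaced the slice-per-position naive scan with Knuth-Morris-Pratt over the token list (failure table + single pass), returning the tail after the first match end.
import Mathlib
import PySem

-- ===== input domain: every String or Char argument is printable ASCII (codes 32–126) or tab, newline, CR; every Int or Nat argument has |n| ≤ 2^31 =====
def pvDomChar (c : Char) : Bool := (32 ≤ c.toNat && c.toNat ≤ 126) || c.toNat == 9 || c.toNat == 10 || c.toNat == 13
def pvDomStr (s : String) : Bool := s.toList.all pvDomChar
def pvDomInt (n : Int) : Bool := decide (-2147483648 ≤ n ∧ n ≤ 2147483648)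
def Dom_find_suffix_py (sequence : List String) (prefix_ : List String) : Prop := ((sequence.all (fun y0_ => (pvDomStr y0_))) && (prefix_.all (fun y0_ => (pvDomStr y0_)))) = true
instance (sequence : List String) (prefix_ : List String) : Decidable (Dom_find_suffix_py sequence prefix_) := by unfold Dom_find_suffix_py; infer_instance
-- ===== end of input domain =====

-- B replaces A's slice-per-position naive scan by Knuth–Morris–Pratt over the token list (failure
-- table + one pass), returning the tail after the first match; objective: alternative algorithm.

-- ===== PORT A =====
-- the 'for i in range(...)' loop with early return
def findA (seq pre : List String) : List Int → Option (List String)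
  | [] => none
  | i :: rest =>
    if PySem.List.slice seq (some i) (some (i + pre.length)) = pre then
      some (PySem.List.slice seq (some (i + pre.length)) none)
    else findA seq pre rest

def find_suffix_py (sequence : List String) (prefix_ : List String) : Option (List String) :=
  findA sequence prefix_
    (PySem.List.pyRange 0 ((sequence.length : Int) - (prefix_.length : Int) + 1) 1)

-- ===== PORT B =====
-- the 'while k > 0 and tok != prefix[k]: k = fail[k-1]' loop; the fuel argument (initialised to the
-- current k) only bounds the descent: with the real failure table fail[k-1] < k, so the chain
-- reaches its exit condition within k steps and the fuel is never exhausted.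
def kmpChase (pre : List String) (fail : List Nat) (tok : String) : Nat → Nat → Nat
  | 0, k => k
  | fuel + 1, k =>
    if 0 < k ∧ tok ≠ pre.getD k "" then kmpChase pre fail tok fuel (fail.getD (k - 1) 0)
    else k

-- one loop body: chase down the failure chain, then extend the match if the next token agrees
def kmpStep (pre : List String) (fail : List Nat) (tok : String) (k : Nat) : Nat :=
  let k' := kmpChase pre fail tok k k
  if tok = pre.getD k' "" then k' + 1 else k'

-- 'fail = [0]*m; k = 0; for q in range(1, m): ... fail[q] = k'
def buildFail (pre : List String) : List Nat :=
  ((List.range' 1 (pre.length - 1)).foldl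
    (fun (st : List Nat × Nat) q =>
      let k := kmpStep pre st.1 (pre.getD q "") st.2
      (st.1.set q k, k))
    (List.replicate pre.length 0, 0)).1

-- 'for i, tok in enumerate(sequence): ... return sequence[i+1:]'; the returned 'rest' is exactly sequence[i+1:]
def kmpScan (pre : List String) (fail : List Nat) : Nat → List String → Option (List String)
  | _, [] => none
  | q, tok :: rest =>
    let q' := kmpStep pre fail tok q
    if q' = pre.length then some rest else kmpScan pre fail q' rest

def find_suffix_py_alt (sequence : List String) (prefix_ : List String) : Option (List String) :=
  if prefix_.length = 0 then some sequence
  else kmpScan prefix_ (buildFail prefix_) 0 sequence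

-- ===== PRECONDITION & SPEC =====
def Spec_find_suffix_py (sequence : List String) (prefix_ : List String) (out : Option (List String)) : Prop := out = find_suffix_py_alt sequence prefix_
instance (sequence : List String) (prefix_ : List String) (out : Option (List String)) : Decidable (Spec_find_suffix_py sequence prefix_ out) := by unfold Spec_find_suffix_py; infer_instance

-- ===== CLAIM (what is proved, stated in full; the proofs are below) =====
def Claim_equal_find_suffix_py : Prop := ∀ (sequence : List String) (prefix_ : List String), Dom_find_suffix_py sequence prefix_ → Spec_find_suffix_py sequence prefix_ (find_suffix_py sequence prefix_)

-- ===== LEMMAS AND PROOFS =====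

-- longest l ≤ |P| with (P.take l) a suffix of s  (the KMP match state)
def mbf (P s : List String) : Nat := Nat.findGreatest (fun l => P.take l <:+ s) P.length

-- longest proper border of P.take l
def pbf (P : List String) (l : Nat) : Nat := Nat.findGreatest (fun j => P.take j <:+ P.take l) (l - 1)

def failUpTo (P : List String) (fail : List Nat) (t : Nat) : Prop :=
  ∀ l, 1 ≤ l → l ≤ t → fail.getD (l - 1) 0 = pbf P l

-- reference implementation: scan ends, naive suffix test
def naiveEnd (P : List String) : List String → List String → Option (List String)
  | _, [] => none
  | s, a :: rest => if P <:+ (s ++ [a]) then some rest else naiveEnd P (s ++ [a]) rest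

-- ---- generic small lemmas ----
theorem suffix_of_suffix_le {α} {l1 l2 t : List α} (h1 : l1 <:+ t) (h2 : l2 <:+ t)
    (h : l1.length ≤ l2.length) : l1 <:+ l2 := by
  obtain ⟨u, rfl⟩ := h2
  have e1 := List.suffix_iff_eq_drop.mp h1
  have hlen : l1.length ≤ u.length + l2.length := by
    simpa using h1.length_le
  have : l1 = l2.drop (l2.length - l1.length) := by
    conv_lhs => rw [e1]
    rw [List.length_append,
      show u.length + l2.length - l1.length = u.length + (l2.length - l1.length) by omega,
      List.drop_length_add_append]
  rw [this]
  exact List.drop_suffix _ _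

theorem suffix_snoc_iff {α} {xs ys : List α} {x y : α} :
    (xs ++ [x]) <:+ (ys ++ [y]) ↔ (xs <:+ ys ∧ x = y) := by
  constructor
  · rintro ⟨u, hu⟩
    rw [← List.append_assoc] at hu
    have := List.append_inj' hu (by simp)
    refine ⟨⟨u, this.1⟩, by simpa using this.2⟩
  · rintro ⟨⟨u, rfl⟩, rfl⟩
    exact ⟨u, by simp⟩

theorem take_succ_getD (P : List String) (j : Nat) (hj : j < P.length) :
    P.take (j + 1) = P.take j ++ [P.getD j ""] := by
  rw [List.take_succ_eq_append_getElem hj, List.getD_eq_getElem?_getD,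
    List.getElem?_eq_getElem hj]
  rfl

theorem findGreatest_congr' {p q : Nat → Prop} [DecidablePred p] [DecidablePred q] {a b : Nat}
    (hba : b ≤ a) (h1 : ∀ j ≤ a, p j ↔ (j ≤ b ∧ q j)) :
    Nat.findGreatest p a = Nat.findGreatest q b := by
  apply le_antisymm
  · rcases Nat.eq_zero_or_pos (Nat.findGreatest p a) with h0 | h0
    · omega
    · have hp : p (Nat.findGreatest p a) :=
        Nat.findGreatest_of_ne_zero rfl (by omega)
      have := (h1 _ (Nat.findGreatest_le a)).mp hp
      exact Nat.le_findGreatest this.1 this.2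
  · rcases Nat.eq_zero_or_pos (Nat.findGreatest q b) with h0 | h0
    · omega
    · have hq : q (Nat.findGreatest q b) :=
        Nat.findGreatest_of_ne_zero rfl (by omega)
      have hle : Nat.findGreatest q b ≤ b := Nat.findGreatest_le b
      have hp : p (Nat.findGreatest q b) :=
        (h1 _ (le_trans hle hba)).mpr ⟨hle, hq⟩
      exact Nat.le_findGreatest (le_trans hle hba) hp

theorem findGreatest_eq_of {p : Nat → Prop} [DecidablePred p] {a x : Nat}
    (hx : x ≤ a) (hp : p x) (hmax : ∀ j ≤ a, p j → j ≤ x) : Nat.findGreatest p a = x := by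
  apply le_antisymm
  · rcases Nat.eq_zero_or_pos (Nat.findGreatest p a) with h0 | h0
    · omega
    · exact hmax _ (Nat.findGreatest_le a)
        (Nat.findGreatest_of_ne_zero rfl (by omega))
  · exact Nat.le_findGreatest hx hp

-- ---- border facts ----
theorem mbf_le_length (P s : List String) : mbf P s ≤ s.length := by
  rcases Nat.eq_zero_or_pos (mbf P s) with h0 | h0
  · omega
  · have hp : P.take (mbf P s) <:+ s :=
      Nat.findGreatest_of_ne_zero (P := fun l => P.take l <:+ s) rfl (by omega)
    have hle : mbf P s ≤ P.length := Nat.findGreatest_le P.length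
    have := hp.length_le
    simpa [List.length_take, Nat.min_eq_left hle] using this

theorem mbf_suffix (P s : List String) : P.take (mbf P s) <:+ s := by
  rcases Nat.eq_zero_or_pos (mbf P s) with h0 | h0
  · simp [h0]
  · exact Nat.findGreatest_of_ne_zero (P := fun l => P.take l <:+ s) rfl (by omega)

theorem mbf_nil (P : List String) : mbf P [] = 0 := by
  rw [mbf, Nat.findGreatest_eq_zero_iff]
  intro n hn hle hsuf
  have := List.suffix_nil.mp hsuf
  have : (P.take n).length = 0 := by rw [this]; rfl
  rw [List.length_take] at this
  omega

theorem pbf_lt (P : List String) (l : Nat) (hl : 1 ≤ l) : pbf P l < l := by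
  have := Nat.findGreatest_le (P := fun j => P.take j <:+ P.take l) (l - 1)
  rw [pbf]
  omega

theorem pbf_suffix (P : List String) (l : Nat) : P.take (pbf P l) <:+ P.take l := by
  rcases Nat.eq_zero_or_pos (pbf P l) with h0 | h0
  · simp [h0]
  · exact Nat.findGreatest_of_ne_zero (P := fun j => P.take j <:+ P.take l) rfl (by omega)

-- ---- chase characterisation ----
theorem chase_eq (P : List String) (fail : List Nat) (a : String) :
    ∀ fuel k, k ≤ fuel → k < P.length → failUpTo P fail k →
      kmpChase P fail a fuel k
        = Nat.findGreatest (fun j => P.take j <:+ P.take k ∧ a = P.getD j "") k := by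
  intro fuel
  induction fuel with
  | zero =>
    intro k hk _ _
    have hk0 : k = 0 := by omega
    subst hk0
    simp [kmpChase]
  | succ fuel ih =>
    intro k hk hkm hf
    rw [kmpChase]
    split_ifs with hcond
    · obtain ⟨hk0, hne⟩ := hcond
      have hpb := pbf_lt P k hk0
      rw [hf k hk0 le_rfl,
        ih (pbf P k) (by omega) (by omega) (fun l h1 h2 => hf l h1 (by omega))]
      refine (findGreatest_congr' (by omega) ?_).symm
      intro j hj
      constructor
      · rintro ⟨hsuf, ha⟩
        have hjk : j < k := by
          rcases Nat.lt_or_ge j k with h | h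
          · exact h
          · exfalso
            have : j = k := le_antisymm hj h
            subst this
            exact hne ha
        have hjpb : j ≤ pbf P k := Nat.le_findGreatest (by omega) hsuf
        refine ⟨hjpb, ?_, ha⟩
        apply suffix_of_suffix_le hsuf (pbf_suffix P k)
        simp only [List.length_take]
        omega
      · rintro ⟨hjpb, hsuf2, ha⟩
        exact ⟨hsuf2.trans (pbf_suffix P k), ha⟩
    · rcases Nat.eq_zero_or_pos k with h0 | h0
      · subst h0
        simp
      · have ha : a = P.getD k "" := by
          by_contra hne
          exact hcond ⟨h0, hne⟩
        exact (findGreatest_eq_of le_rfl ⟨List.suffix_refl _, ha⟩ (fun j hj _ => hj)).symm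

-- ---- step lemma ----
theorem step_eq (P : List String) (fail : List Nat) (a : String) (s : List String) (q : Nat)
    (hq : q = mbf P s) (hqm : q < P.length) (hf : failUpTo P fail q) :
    kmpStep P fail a q = mbf P (s ++ [a]) := by
  subst hq
  have hchase := chase_eq P fail a (mbf P s) (mbf P s) le_rfl hqm hf
  simp only [kmpStep, hchase]
  set K := Nat.findGreatest (fun j => P.take j <:+ P.take (mbf P s) ∧ a = P.getD j "") (mbf P s)
    with hKdef
  have hKle : K ≤ mbf P s := Nat.findGreatest_le _
  have hKsuf : P.take K <:+ P.take (mbf P s) := by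
    rcases Nat.eq_zero_or_pos K with h0 | h0
    · simp [h0]
    · exact (Nat.findGreatest_of_ne_zero (hKdef.symm) (by omega)).1
  have hchar : ∀ l, l ≤ P.length → 1 ≤ l →
      ((P.take l <:+ s ++ [a]) ↔
        (l - 1 ≤ mbf P s ∧ P.take (l - 1) <:+ P.take (mbf P s) ∧ a = P.getD (l - 1) "")) := by
    intro l hl hl1
    have hlm : l - 1 < P.length := by omega
    rw [show l = (l - 1) + 1 by omega, take_succ_getD P (l - 1) hlm, suffix_snoc_iff]
    constructor
    · rintro ⟨hsuf, hga⟩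
      have h1 : l - 1 ≤ mbf P s := Nat.le_findGreatest (by omega) hsuf
      refine ⟨h1, ?_, hga.symm⟩
      apply suffix_of_suffix_le hsuf (mbf_suffix P s)
      simp only [List.length_take]
      omega
    · rintro ⟨h1, hsuf, hga⟩
      exact ⟨hsuf.trans (mbf_suffix P s), hga.symm⟩
  split_ifs with hbr
  · symm
    apply findGreatest_eq_of (by omega)
    · exact (hchar (K + 1) (by omega) (by omega)).mpr
        ⟨by simpa using hKle, by simpa using hKsuf, by simpa using hbr⟩
    · intro l hl hsufl
      rcases Nat.eq_zero_or_pos l with rfl | hl1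
      · omega
      · obtain ⟨h1, hsuf, hga⟩ := (hchar l hl hl1).mp hsufl
        have : l - 1 ≤ K := Nat.le_findGreatest h1 ⟨hsuf, hga⟩
        omega
  · have hK0 : K = 0 := by
      by_contra h
      exact hbr (Nat.findGreatest_of_ne_zero (hKdef.symm) h).2
    symm
    rw [hK0]
    apply findGreatest_eq_of (Nat.zero_le _) (by simp)
    intro l hl hsufl
    rcases Nat.eq_zero_or_pos l with rfl | hl1
    · omega
    · obtain ⟨h1, hsuf, hga⟩ := (hchar l hl hl1).mp hsufl
      have hlK : l - 1 ≤ K := Nat.le_findGreatest h1 ⟨hsuf, hga⟩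
      rw [hK0] at hlK
      have : l = 1 := by omega
      subst this
      rw [hK0] at hbr
      simp at hga
      exact absurd hga hbr

-- ---- failure table correctness ----
theorem mbf_shift (P : List String) (q : Nat) (hq : q + 1 ≤ P.length) :
    mbf P ((P.drop 1).take q) = pbf P (q + 1) := by
  have hs : (P.drop 1).take q = (P.take (q + 1)).drop 1 := by
    rw [List.drop_take]
    norm_num
  have hslen : ((P.drop 1).take q).length = q := by
    simp only [List.length_take, List.length_drop]
    omega
  have hcong :
      Nat.findGreatest (fun l => P.take l <:+ (P.drop 1).take q) P.length
        = Nat.findGreatest (fun l => P.take l <:+ P.take (q + 1)) q := by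
    apply findGreatest_congr' (by omega)
    intro l hl
    constructor
    · intro hsuf
      have hlen : l ≤ q := by
        have := hsuf.length_le
        rw [hslen, List.length_take] at this
        omega
      refine ⟨hlen, hsuf.trans ?_⟩
      rw [hs]
      exact List.drop_suffix _ _
    · rintro ⟨hlq, hsuf⟩
      apply suffix_of_suffix_le hsuf (by rw [hs]; exact List.drop_suffix _ _)
      rw [hslen, List.length_take]
      omega
  rw [mbf, hcong, pbf]
  norm_num

theorem buildFail_correct (P : List String) (hm : 0 < P.length) :
    failUpTo P (buildFail P) P.length := by
  have aux : ∀ t, t ≤ P.length - 1 →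
      (((List.range' 1 t).foldl
          (fun (st : List Nat × Nat) q =>
            let k := kmpStep P st.1 (P.getD q "") st.2
            (st.1.set q k, k))
          (List.replicate P.length 0, 0)).1.length = P.length ∧
       ((List.range' 1 t).foldl
          (fun (st : List Nat × Nat) q =>
            let k := kmpStep P st.1 (P.getD q "") st.2
            (st.1.set q k, k))
          (List.replicate P.length 0, 0)).2 = mbf P ((P.drop 1).take t) ∧
       failUpTo P
         ((List.range' 1 t).foldl
            (fun (st : List Nat × Nat) q =>
              let k := kmpStep P st.1 (P.getD q "") st.2
              (st.1.set q k, k))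
            (List.replicate P.length 0, 0)).1 (t + 1)) := by
    intro t
    induction t with
    | zero =>
      intro _
      refine ⟨by simp, by simp [mbf_nil], ?_⟩
      intro l h1 h2
      have : l = 1 := by omega
      subst this
      simp only [List.range'_zero, List.foldl_nil]
      rw [List.getD_eq_getElem?_getD]
      simp only [List.getElem?_replicate]
      rw [pbf]
      simp [hm]
    | succ t ih =>
      intro ht
      obtain ⟨ihlen, ihk, ihfail⟩ := ih (by omega)
      rw [List.range'_1_concat, List.foldl_append]
      set st := (List.range' 1 t).foldl
          (fun (st : List Nat × Nat) q =>
            let k := kmpStep P st.1 (P.getD q "") st.2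
            (st.1.set q k, k))
          (List.replicate P.length 0, 0) with hst
      simp only [List.foldl_cons, List.foldl_nil]
      have hm2 : 2 ≤ P.length := by omega
      have hkm : st.2 < P.length := by
        rw [ihk]
        have h1 := mbf_le_length P ((P.drop 1).take t)
        have h2 : ((P.drop 1).take t).length ≤ t := by
          simp
        omega
      have hstep : kmpStep P st.1 (P.getD (1 + t) "") st.2
          = mbf P ((P.drop 1).take t ++ [P.getD (1 + t) ""]) := by
        apply step_eq P st.1 _ _ st.2 ihk hkm
        intro l h1 h2
        apply ihfail l h1
        have h3 := mbf_le_length P ((P.drop 1).take t)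
        have h4 : ((P.drop 1).take t).length ≤ t := by
          simp
        omega
      have hsnoc : (P.drop 1).take t ++ [P.getD (1 + t) ""] = (P.drop 1).take (t + 1) := by
        rw [take_succ_getD (P.drop 1) t (by simp; omega)]
        congr 2
        rw [List.getD_eq_getElem?_getD, List.getD_eq_getElem?_getD, List.getElem?_drop]
      rw [hstep, hsnoc]
      refine ⟨by simp [ihlen], rfl, ?_⟩
      intro l h1 h2
      rcases Nat.lt_or_ge l (t + 2) with hcase | hcase
      · -- old entries: index l - 1 ≠ 1 + t
        rw [List.getD_eq_getElem?_getD]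
        rw [List.getElem?_set_ne (by omega)]
        rw [← List.getD_eq_getElem?_getD]
        exact ihfail l h1 (by omega)
      · -- the freshly written entry, l = t + 2
        have hl : l = t + 2 := by omega
        subst hl
        rw [List.getD_eq_getElem?_getD]
        simp only [show t + 2 - 1 = 1 + t from by omega]
        rw [List.getElem?_set_self (by rw [ihlen]; omega)]
        simp only [Option.getD_some]
        rw [← mbf_shift P (t + 1) (by omega)]
  have := (aux (P.length - 1) le_rfl).2.2
  rw [show P.length - 1 + 1 = P.length from by omega] at this
  rw [buildFail]
  exact this

-- ---- scan lemma ----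
theorem scan_eq (P : List String) (fail : List Nat) (hm : 0 < P.length)
    (hf : failUpTo P fail P.length) :
    ∀ rest s q, q = mbf P s → q < P.length →
      kmpScan P fail q rest = naiveEnd P s rest := by
  intro rest
  induction rest with
  | nil => intro s q _ _; simp [kmpScan, naiveEnd]
  | cons a rest ih =>
    intro s q hq hqm
    have hstep : kmpStep P fail a q = mbf P (s ++ [a]) :=
      step_eq P fail a s q hq hqm (fun l h1 h2 => hf l h1 (by omega))
    have hiff : mbf P (s ++ [a]) = P.length ↔ P <:+ s ++ [a] := by
      constructor
      · intro h
        have := Nat.findGreatest_of_ne_zero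
          (P := fun l => P.take l <:+ s ++ [a]) h (by omega)
        simpa using this
      · intro h
        have h1 : P.length ≤ mbf P (s ++ [a]) :=
          Nat.le_findGreatest le_rfl (by simpa using h)
        have h2 : mbf P (s ++ [a]) ≤ P.length := Nat.findGreatest_le _
        omega
    simp only [kmpScan, naiveEnd, hstep]
    by_cases hP : P <:+ s ++ [a]
    · rw [if_pos (hiff.mpr hP), if_pos hP]
    · rw [if_neg (fun h => hP (hiff.mp h)), if_neg hP]
      exact ih (s ++ [a]) _ rfl
        (lt_of_le_of_ne (Nat.findGreatest_le _) (fun h => hP (hiff.mp h)))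

theorem alt_eq_naiveEnd (seq P : List String) (hm : 0 < P.length) :
    find_suffix_py_alt seq P = naiveEnd P [] seq := by
  rw [find_suffix_py_alt, if_neg (by omega)]
  exact scan_eq P (buildFail P) hm (buildFail_correct P hm) seq [] 0 (mbf_nil P).symm hm

-- ---- first-end characterisations ----
theorem naiveEnd_char (P : List String) :
    ∀ rest s, naiveEnd P s rest
      = ((List.range rest.length).find? (fun e => decide (P <:+ s ++ rest.take (e + 1)))).map
          (fun e => rest.drop (e + 1)) := by
  intro rest
  induction rest with
  | nil => intro s; simp [naiveEnd]
  | cons a rest ih =>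
    intro s
    rw [naiveEnd]
    split_ifs with hP
    · rw [List.length_cons, List.range_succ_eq_map,
        List.find?_cons_of_pos (by simpa using hP)]
      simp
    · rw [ih (s ++ [a]), List.length_cons, List.range_succ_eq_map,
        List.find?_cons_of_neg (by simpa using hP), List.find?_map, Option.map_map]
      congr 1
      congr 1
      funext e
      simp [Function.comp, List.append_assoc]

theorem findA_char (seq pre : List String) (is : List Int) :
    findA seq pre is
      = (is.find? (fun i => decide (PySem.List.slice seq (some i) (some (i + pre.length)) = pre))).map
          (fun i => PySem.List.slice seq (some (i + pre.length)) none) := by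
  induction is with
  | nil => simp [findA]
  | cons i rest ih =>
    rw [findA]
    split_ifs with h
    · rw [List.find?_cons_of_pos (by simpa using h)]
      rfl
    · rw [List.find?_cons_of_neg (by simpa using h)]
      exact ih

-- ---- A = naiveEnd ----
theorem a_eq_naiveEnd (seq P : List String) (hm : 0 < P.length) :
    find_suffix_py seq P = naiveEnd P [] seq := by
  rw [naiveEnd_char P seq [], find_suffix_py, findA_char]
  rcases Nat.lt_or_ge seq.length P.length with hlt | hge
  · -- the pattern is longer than the sequence: both sides are none
    rw [PySem.List.pyRange_one_eq_nil (by omega)]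
    have : (List.range seq.length).find?
          (fun e => decide (P <:+ [] ++ seq.take (e + 1))) = none := by
      rw [List.find?_range_eq_none]
      intro e he
      simp only [Bool.not_eq_true', decide_eq_false_iff_not, List.nil_append]
      intro hsuf
      have hl := hsuf.length_le
      rw [List.length_take] at hl
      omega
    rw [this]
    rfl
  · rw [show ((seq.length : Int) - (P.length : Int) + 1)
        = (((seq.length - P.length + 1 : Nat)) : Int) by push_cast; omega]
    rw [PySem.List.pyRange_zero_natCast, List.find?_map]
    have hpred : ((fun i : Int =>
          decide (PySem.List.slice seq (some i) (some (i + ↑P.length)) = P))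
            ∘ (fun k : Nat => (k : Int)))
        = fun i : Nat => decide ((seq.drop i).take P.length = P) := by
      funext i
      simp [Function.comp, PySem.List.slice_natCast_add]
    rw [hpred, Option.map_map]
    have hmapfn : ((fun i : Int => PySem.List.slice seq (some (i + ↑P.length)) none)
            ∘ (fun k : Nat => (k : Int)))
        = fun i : Nat => seq.drop (i + P.length) := by
      funext i
      simp only [Function.comp]
      rw [show ((i : Int) + ↑P.length) = ((i + P.length : Nat) : Int) by push_cast; omega,
        PySem.List.slice_from_natCast]
    rw [hmapfn]
    cases hfind : (List.range (seq.length - P.length + 1)).find?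
        (fun i => decide ((seq.drop i).take P.length = P)) with
    | none =>
      rw [List.find?_range_eq_none] at hfind
      have : (List.range seq.length).find?
            (fun e => decide (P <:+ [] ++ seq.take (e + 1))) = none := by
        rw [List.find?_range_eq_none]
        intro e he
        simp only [Bool.not_eq_true', decide_eq_false_iff_not, List.nil_append]
        intro hsuf
        have hme : P.length ≤ e + 1 := by
          have := hsuf.length_le
          rw [List.length_take] at this
          omega
        have hdrop := List.suffix_iff_eq_drop.mp hsuf
        rw [List.length_take,
          show min (e + 1) seq.length - P.length = (e + 1) - P.length from by omega,
          List.drop_take, show e + 1 - (e + 1 - P.length) = P.length from by omega] at hdrop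
        have hcontra := hfind (e + 1 - P.length) (by omega)
        simp only [Bool.not_eq_true', decide_eq_false_iff_not] at hcontra
        exact hcontra hdrop.symm
      rw [this]
      rfl
    | some i =>
      rw [List.find?_range_eq_some] at hfind
      obtain ⟨hRi, hik, hmin⟩ := hfind
      simp only [List.mem_range] at hik
      simp only [decide_eq_true_eq] at hRi
      have hin : i + P.length ≤ seq.length := by
        have := congrArg List.length hRi
        simp only [List.length_take, List.length_drop] at this
        omega
      have : (List.range seq.length).find?
            (fun e => decide (P <:+ [] ++ seq.take (e + 1))) = some (i + P.length - 1) := by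
        rw [List.find?_range_eq_some]
        refine ⟨?_, ?_, ?_⟩
        · simp only [decide_eq_true_eq, List.nil_append]
          rw [show i + P.length - 1 + 1 = i + P.length from by omega]
          refine ⟨seq.take i, ?_⟩
          conv_rhs => rw [List.take_add]
          rw [hRi]
        · simp only [List.mem_range]
          omega
        · intro j hj
          simp only [Bool.not_eq_true', decide_eq_false_iff_not, List.nil_append]
          intro hsuf
          have hjn : j + 1 ≤ seq.length := by omega
          have hme : P.length ≤ j + 1 := by
            have := hsuf.length_le
            rw [List.length_take] at this
            omega
          have hdrop := List.suffix_iff_eq_drop.mp hsuf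
          rw [List.length_take,
            show min (j + 1) seq.length - P.length = (j + 1) - P.length from by omega,
            List.drop_take,
            show j + 1 - (j + 1 - P.length) = P.length from by omega] at hdrop
          have hcontra := hmin (j + 1 - P.length) (by omega)
          simp only [Bool.not_eq_true', decide_eq_false_iff_not] at hcontra
          exact hcontra hdrop.symm
      rw [this]
      simp only [Option.map_some]
      rw [show i + P.length - 1 + 1 = i + P.length from by omega]

theorem a_eq_alt_zero (seq : List String) (P : List String) (hm : P.length = 0) :
    find_suffix_py seq P = find_suffix_py_alt seq P := by
  have hP : P = [] := List.length_eq_zero_iff.mp hm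
  subst hP
  rw [find_suffix_py, find_suffix_py_alt,
    if_pos (show ([] : List String).length = 0 from rfl)]
  rw [show ((seq.length : Int) - (([] : List String).length : Int) + 1)
      = (seq.length : Int) + 1 by simp]
  rw [PySem.List.pyRange_one_cons (by omega), findA]
  rw [if_pos (by norm_num [pysem])]
  norm_num [pysem]

-- ===== VERDICT (by name: the statement is the Claim_ definition above) =====
theorem find_suffix_py_spec : Claim_equal_find_suffix_py := by
  intro seq P _
  unfold Spec_find_suffix_py
  rcases Nat.eq_zero_or_pos P.length with hm | hm
  · exact a_eq_alt_zero seq P hm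
  · rw [a_eq_naiveEnd seq P hm, alt_eq_naiveEnd seq P hm]
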